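-- pv_equiv track=rewrite | github.com/jordanhubbard/Theseus | cleanroom/python/theseus_struct_cr/__init__.py | _calcsize_impl
-- ===== SOURCE A (Python) =====
-- _SCALAR_SIZES = {
--     'x': 1, 'c': 1, 'b': 1, 'B': 1, '?': 1,
--     'h': 2, 'H': 2,
--     'i': 4, 'I': 4, 'l': 4, 'L': 4,
--     'q': 8, 'Q': 8,
--     'e': 2, 'f': 4, 'd': 8,
-- }
--
-- _BYTE_ORDER_CHARS = ('<', '>', '!', '=', '@')
--
-- def _parse_format(fmt):
--     """Return (little_endian: bool, items: list[(count, code)])."""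
--     if isinstance(fmt, (bytes, bytearray)):
--         fmt = fmt.decode('ascii')
--     if not isinstance(fmt, str):
--         raise TypeError("Struct format must be a str or bytes-like object")
--
--     little_endian = True  # default for '@', '=', '<'
--     i = 0
--     n = len(fmt)
--     if n > 0 and fmt[0] in _BYTE_ORDER_CHARS:
--         bo = fmt[0]
--         if bo in ('>', '!'):
--             little_endian = False
--         else:
--             little_endian = True
--         i = 1
--
--     items = []
--     count_str = ''
--     while i < n:
--         c = fmt[i]
--         if c.isspace():
--             i += 1
--             continue
--         if c.isdigit():
--             count_str += c
--             i += 1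
--             continue
--         if c in _BYTE_ORDER_CHARS:
--             raise ValueError("byte order char must be at start of format")
--         count = int(count_str) if count_str else 1
--         count_str = ''
--         if c not in _SCALAR_SIZES and c not in ('s', 'p'):
--             raise ValueError("bad char in struct format: %r" % c)
--         items.append((count, c))
--         i += 1
--     if count_str:
--         raise ValueError("repeat count given without format specifier")
--     return little_endian, items
--
-- def _calcsize_impl(fmt=''):
--     """Return the number of bytes that pack/unpack will use for fmt."""
--     _, items = _parse_format(fmt)
--     total = 0
--     for count, code in items:
--         if code in ('s', 'p'):
--             total += count
--         else:
--             total += count * _SCALAR_SIZES[code]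
--     return total
-- ===== SOURCE B (Python) =====
-- _SCALAR_SIZES = {
--     'x': 1, 'c': 1, 'b': 1, 'B': 1, '?': 1,
--     'h': 2, 'H': 2,
--     'i': 4, 'I': 4, 'l': 4, 'L': 4,
--     'q': 8, 'Q': 8,
--     'e': 2, 'f': 4, 'd': 8,
-- }
--
-- _BYTE_ORDER_CHARS = ('<', '>', '!', '=', '@')
--
--
-- def _calcsize_impl(fmt=''):
--     """Return the number of bytes that pack/unpack will use for fmt."""
--     if isinstance(fmt, (bytes, bytearray)):
--         fmt = fmt.decode('ascii')
--     if not isinstance(fmt, str):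
--         raise TypeError("Struct format must be a str or bytes-like object")
--     body = fmt[1:] if fmt[:1] in _BYTE_ORDER_CHARS else fmt
--     total = 0
--     count_str = ''
--     for c in body:
--         if c.isspace():
--             continue
--         if c.isdigit():
--             count_str += c
--             continue
--         if c in _BYTE_ORDER_CHARS:
--             raise ValueError("byte order char must be at start of format")
--         n = int(count_str) if count_str else 1
--         count_str = ''
--         size = _SCALAR_SIZES.get(c)
--         if size is not None:
--             total += n * size
--         elif c in ('s', 'p'):
--             total += n
--         else:
--             raise ValueError("bad char in struct format: %r" % c)
--     if count_str:
--         raise ValueError("repeat count given without format specifier")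
--     return total
-- ===== Notes on version B (the rewrite author's own statement) =====
-- stated objective: simpler
-- what changed: One fused pass that adds count*size straight into the running total, replacing the two-phase parser that first builds an items list (and an unused endianness flag) and then sums it in a second loop.
import Mathlib
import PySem

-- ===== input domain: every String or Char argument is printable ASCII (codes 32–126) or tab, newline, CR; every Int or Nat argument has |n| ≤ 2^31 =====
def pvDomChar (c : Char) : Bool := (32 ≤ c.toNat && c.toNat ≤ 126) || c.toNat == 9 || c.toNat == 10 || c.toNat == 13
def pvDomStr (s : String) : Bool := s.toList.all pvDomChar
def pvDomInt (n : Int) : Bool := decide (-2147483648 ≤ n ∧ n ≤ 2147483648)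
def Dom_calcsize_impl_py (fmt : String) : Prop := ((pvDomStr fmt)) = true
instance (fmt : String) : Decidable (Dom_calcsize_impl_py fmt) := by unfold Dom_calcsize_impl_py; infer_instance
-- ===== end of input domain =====

-- B fuses A's two phases (parse into an items list, then sum it) into one pass that adds
-- count*size straight into the running total; same exception paths, return value only.

-- ===== PORT A =====

-- _SCALAR_SIZES
def pvScalarSizes : PySem.Dict Char Int := PySem.Dict.ofList
  [('x', 1), ('c', 1), ('b', 1), ('B', 1), ('?', 1),
   ('h', 2), ('H', 2),
   ('i', 4), ('I', 4), ('l', 4), ('L', 4),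
   ('q', 8), ('Q', 8),
   ('e', 2), ('f', 4), ('d', 8)]

-- c in _BYTE_ORDER_CHARS
def pvIsByteOrder (c : Char) : Bool := c == '<' || c == '>' || c == '!' || c == '=' || c == '@'

-- the while-loop of _parse_format: state = (remaining chars, count_str); none = a raise.
-- (The little_endian flag _parse_format also returns is discarded by _calcsize_impl, so it
-- is not carried here.)
def pvParseItems : List Char → List Char → Option (List (Int × Char))
  | [], countStr =>
      -- after the loop: 'if count_str: raise ValueError(...)'
      if countStr.isEmpty then some [] else none
  | c :: rest, countStr =>
      if PySem.Chars.isspace c then pvParseItems rest countStr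
      else if PySem.Chars.isdigit c then pvParseItems rest (countStr ++ [c])
      else if pvIsByteOrder c then none   -- ValueError: byte order char must be at start
      else
        -- count = int(count_str) if count_str else 1
        let count : Int := if countStr.isEmpty then 1 else (PySem.Int.ofChars? countStr).getD 0
        if !pvScalarSizes.contains c && !(c == 's' || c == 'p') then none  -- ValueError: bad char
        else (pvParseItems rest []).map (fun items => (count, c) :: items)

-- the summing loop of _calcsize_impl
def pvSumStep (total : Int) (p : Int × Char) : Int :=
  if p.2 == 's' || p.2 == 'p' then total + p.1 else total + p.1 * pvScalarSizes.getD p.2 0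

-- 'i = 1' when the first char is a byte-order char (A), = 'fmt[1:] if fmt[:1] in _BYTE_ORDER_CHARS else fmt' (B)
def pvBody : List Char → List Char
  | [] => []
  | c :: rest => if pvIsByteOrder c then rest else c :: rest

def calcsize_impl_py (fmt : String) : Int :=
  match pvParseItems (pvBody fmt.toList) [] with
  | none => 0          -- _parse_format raises here; excluded by Pre_
  | some items => items.foldl pvSumStep 0

-- ===== PORT B =====

-- B's single for-loop: state = (remaining chars, count_str, total); none = a raise.
def pvCalcLoop : List Char → List Char → Int → Option Int
  | [], countStr, total =>
      if countStr.isEmpty then some total else none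
  | c :: rest, countStr, total =>
      if PySem.Chars.isspace c then pvCalcLoop rest countStr total
      else if PySem.Chars.isdigit c then pvCalcLoop rest (countStr ++ [c]) total
      else if pvIsByteOrder c then none
      else
        let n : Int := if countStr.isEmpty then 1 else (PySem.Int.ofChars? countStr).getD 0
        match pvScalarSizes.get? c with
        | some size => pvCalcLoop rest [] (total + n * size)
        | none => if c == 's' || c == 'p' then pvCalcLoop rest [] (total + n) else none

def calcsize_impl_py_alt (fmt : String) : Int :=
  (pvCalcLoop (pvBody fmt.toList) [] 0).getD 0

-- ===== PRECONDITION & SPEC =====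

-- Pre_ excludes exactly the inputs on which A raises ValueError: a byte-order char or a bad
-- char after the first position, or a trailing repeat count with no format code after it.
def Pre_calcsize_impl_py (fmt : String) : Prop :=
  (let body := pvBody fmt.toList
   body.all (fun c => PySem.Chars.isspace c || PySem.Chars.isdigit c ||
                      pvScalarSizes.contains c || c == 's' || c == 'p')
   && (body.reverse.takeWhile (fun c => PySem.Chars.isspace c || PySem.Chars.isdigit c)).all
        (fun c => !PySem.Chars.isdigit c)) = true

instance (fmt : String) : Decidable (Pre_calcsize_impl_py fmt) := by
  unfold Pre_calcsize_impl_py; infer_instance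

def pvWitness_calcsize_impl_py : String := "<2h3s"

def Spec_calcsize_impl_py (fmt : String) (out : Int) : Prop := out = calcsize_impl_py_alt fmt
instance (fmt : String) (out : Int) : Decidable (Spec_calcsize_impl_py fmt out) := by
  unfold Spec_calcsize_impl_py; infer_instance

-- ===== CLAIM (what is proved, stated in full; the proofs are below) =====
def Claim_equal_calcsize_impl_py : Prop := ∀ (fmt : String), Dom_calcsize_impl_py fmt → Pre_calcsize_impl_py fmt → Spec_calcsize_impl_py fmt (calcsize_impl_py fmt)

-- ===== LEMMAS AND PROOFS =====

-- the summing step adds a value that depends only on the item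
lemma pvSumStep_eq (total : Int) (p : Int × Char) :
    pvSumStep total p = total + pvSumStep 0 p := by
  unfold pvSumStep; split <;> omega

lemma pvFoldl_sumStep (items : List (Int × Char)) (t : Int) :
    items.foldl pvSumStep t = t + items.foldl pvSumStep 0 := by
  induction items generalizing t with
  | nil => simp
  | cons p rest ih =>
      simp only [List.foldl_cons]
      rw [ih, ih (pvSumStep 0 p), pvSumStep_eq]
      omega

-- pushing a freshly parsed item through the summing fold
lemma pvMapConsSum (o : Option (List (Int × Char))) (p : Int × Char) (total : Int) :
    (o.map (fun items => p :: items)).map (fun items => total + items.foldl pvSumStep 0)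
      = o.map (fun items => (total + pvSumStep 0 p) + items.foldl pvSumStep 0) := by
  cases o with
  | none => rfl
  | some items =>
      simp only [Option.map_some, List.foldl_cons, Option.some.injEq]
      rw [pvFoldl_sumStep]; omega

-- main invariant: B's fused loop computes the sum of the items A's parser would produce
lemma pvCalcLoop_eq (cs countStr : List Char) (total : Int) :
    pvCalcLoop cs countStr total =
      (pvParseItems cs countStr).map (fun items => total + items.foldl pvSumStep 0) := by
  induction cs generalizing countStr total with
  | nil =>
      unfold pvCalcLoop pvParseItems
      split <;> simp
  | cons c rest ih =>
      unfold pvCalcLoop pvParseItems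
      by_cases hs : PySem.Chars.isspace c = true
      · simp only [hs, if_true]; exact ih _ _
      · simp only [hs]
        by_cases hd : PySem.Chars.isdigit c = true
        · simp only [hd, if_true]; exact ih _ _
        · simp only [hd]
          by_cases hb : pvIsByteOrder c = true
          · simp [hb]
          · simp only [hb]
            generalize (if countStr.isEmpty then (1 : Int)
              else (PySem.Int.ofChars? countStr).getD 0) = n
            rcases hg : pvScalarSizes.get? c with _ | size
            · -- not a scalar code: 's'/'p' or a bad char
              have hc : pvScalarSizes.contains c = false :=
                (PySem.Dict.get?_eq_none_iff_contains pvScalarSizes c).mp hg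
              by_cases hsp : (c == 's' || c == 'p') = true
              · have hstep : pvSumStep 0 (n, c) = n := by
                  simp [pvSumStep, hsp]
                simp only [hsp, hc]
                simp only [Bool.false_eq_true, Bool.not_true, Bool.and_false, if_false, if_true]
                rw [ih, pvMapConsSum, hstep]
              · simp [hsp, hc]
            · -- a scalar code: c is a key of _SCALAR_SIZES, hence neither 's' nor 'p'
              have hc : pvScalarSizes.contains c = true := by
                rcases h : pvScalarSizes.contains c
                · rw [← PySem.Dict.get?_eq_none_iff_contains] at h
                  rw [h] at hg; simp at hg
                · rfl
              have hns : (c == 's') = false := by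
                rcases h : (c == 's')
                · rfl
                · rw [eq_of_beq h] at hg
                  have h2 : pvScalarSizes.get? 's' = none := by decide
                  rw [h2] at hg; simp at hg
              have hnp : (c == 'p') = false := by
                rcases h : (c == 'p')
                · rfl
                · rw [eq_of_beq h] at hg
                  have h2 : pvScalarSizes.get? 'p' = none := by decide
                  rw [h2] at hg; simp at hg
              have hstep : pvSumStep 0 (n, c) = n * size := by
                have hgd : pvScalarSizes.getD c 0 = size := by
                  rw [PySem.Dict.getD_eq_get?_getD, hg]; rfl
                simp [pvSumStep, hns, hnp, hgd]
              simp only [hc, hns, hnp]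
              simp only [Bool.false_eq_true, Bool.not_true, Bool.false_and, if_false]
              rw [ih, pvMapConsSum, hstep]

-- ===== VERDICT (by name: the statement is the Claim_ definition above) =====
theorem calcsize_impl_py_spec : Claim_equal_calcsize_impl_py := by
  intro fmt _ _
  unfold Spec_calcsize_impl_py calcsize_impl_py calcsize_impl_py_alt
  rw [pvCalcLoop_eq]
  cases pvParseItems _ [] <;> simp
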